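-- pv_equiv track=rewrite | github.com/Luminous-Dynamics/luminous-nix | scripts/plugins/features/package_search_plugin.py | _parse_search_output
-- ===== SOURCE A (Python) =====
-- from typing import Dict, Any, List
--
-- def _parse_search_output(output: str) -> List[Dict[str, Any]]:
--     """Parse nix search output into structured results"""
--     results = []
--     current_package = None
--
--     for line in output.split('\n'):
--         if line.startswith('* '):
--             # New package
--             if current_package:
--                 results.append(current_package)
--
--             # Extract package name
--             parts = line.split(' ', 2)
--             if len(parts) >= 2:
--                 current_package = {
--                     'name': parts[1].strip(),
--                     'description': ''
--                 }
--         elif line.strip() and current_package: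
--             # Description line
--             current_package['description'] = line.strip()
--
--     # Don't forget the last package
--     if current_package:
--         results.append(current_package)
--
--     return results
-- ===== SOURCE B (Python) =====
-- from typing import Dict, Any, List
--
-- def _parse_search_output(output: str) -> List[Dict[str, Any]]:
--     """Parse nix search output: find header indices, then read each block as a segment."""
--     lines = output.split('\n')
--     n = len(lines)
--     results = []
--     i = 0
--     # skip anything before the first '* ' header
--     while i < n and not lines[i].startswith('* '):
--         i += 1
--     while i < n:
--         header = lines[i]
--         j = i + 1
--         while j < n and not lines[j].startswith('* '):
--             j += 1
--         name = header.split(' ', 2)[1].strip()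
--         description = ''
--         for line in reversed(lines[i + 1:j]):
--             s = line.strip()
--             if s:
--                 description = s
--                 break
--         results.append({'name': name, 'description': description})
--         i = j
--     return results
-- ===== Notes on version B (the rewrite author's own statement) =====
-- stated objective: alternative
-- what changed: A's single running-state pass (a current-package dict created at each header and its description overwritten by every later non-empty line) is replaced by an index-based segmentation: skip to the first '* ' header, then for each header scan forward to the next header and build the package from the header plus a backwards search for the last non-empty line of the block.
import Mathlib
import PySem

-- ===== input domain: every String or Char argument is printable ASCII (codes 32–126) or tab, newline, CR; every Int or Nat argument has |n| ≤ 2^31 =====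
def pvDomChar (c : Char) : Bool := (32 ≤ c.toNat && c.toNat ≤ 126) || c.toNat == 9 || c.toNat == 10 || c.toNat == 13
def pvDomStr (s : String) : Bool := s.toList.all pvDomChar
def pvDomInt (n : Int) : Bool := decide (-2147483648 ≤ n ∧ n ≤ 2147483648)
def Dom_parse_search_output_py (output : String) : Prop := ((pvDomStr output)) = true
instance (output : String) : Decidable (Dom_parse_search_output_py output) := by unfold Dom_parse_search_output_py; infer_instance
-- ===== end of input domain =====

-- B replaces A's single running-state pass (a current-package dict mutated line by line) by an
-- index-based segmentation: find each '* ' header, scan its block up to the next header, and take the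
-- last non-empty line by a backwards search; same return value (objective: alternative, no speed claim).

-- ===== PORT A =====
-- loop body of A's `for line in output.split('\n')`; state = (results, current_package)
def pvAStep (st : List (List (String × String)) × Option (PySem.Dict String String)) (line : String) :
    List (List (String × String)) × Option (PySem.Dict String String) :=
  if PySem.Str.startswith line "* " then
    let results := match st.2 with
      | some c => st.1 ++ [c.items]
      | none => st.1
    let parts := (PySem.Str.splitMax? line " " 2).getD []  -- sep " " ≠ "" so never none
    if 2 ≤ parts.length then
      -- parts[1] is exact under the preceding length guard
      (results, some (PySem.Dict.ofList
        [("name", PySem.Str.strip (PySem.List.pyGetD parts 1 "")), ("description", "")]))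
    else (results, st.2)
  else if PySem.Str.strip line = "" then st
  else match st.2 with
    | some c => (st.1, some (c.insert "description" (PySem.Str.strip line)))
    | none => st

-- trailing `if current_package: results.append(current_package)`
def pvAFinish (st : List (List (String × String)) × Option (PySem.Dict String String)) :
    List (List (String × String)) :=
  match st.2 with
  | some c => st.1 ++ [c.items]
  | none => st.1

def parse_search_output_py (output : String) : List (List (String × String)) :=
  pvAFinish (((PySem.Str.split? output "\n").getD []).foldl pvAStep ([], none))

-- ===== PORT B =====
-- header.split(' ', 2)[1].strip(); index 1 always exists for a '* ' header line
def pvHdrName (header : String) : String :=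
  PySem.Str.strip (PySem.List.pyGetD ((PySem.Str.splitMax? header " " 2).getD []) 1 "")

-- `while i < n and not lines[i].startswith('* '): i += 1`
def pvSkip (lines : List String) (n i : Nat) : Nat :=
  if _h : i < n ∧ ¬ (PySem.Str.startswith (lines.getD i "") "* " = true) then pvSkip lines n (i + 1)
  else i
  termination_by n - i
  decreasing_by omega

-- needed by pvBLoop's termination argument
theorem pvSkip_ge (lines : List String) (n i : Nat) : i ≤ pvSkip lines n i := by
  fun_induction pvSkip lines n i with
  | case1 i h ih => omega
  | case2 i h => omega

-- `for line in reversed(body): s = line.strip(); if s: description = s; break`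
def pvDescRev : List String → String
  | [] => ""
  | l :: ls => if PySem.Str.strip l = "" then pvDescRev ls else PySem.Str.strip l

-- outer `while i < n:` loop of B
def pvBLoop (lines : List String) (n i : Nat) (results : List (List (String × String))) :
    List (List (String × String)) :=
  if _h : i < n then
    let header := lines.getD i ""
    let j := pvSkip lines n (i + 1)
    let body := (lines.drop (i + 1)).take (j - (i + 1))  -- lines[i+1:j]
    pvBLoop lines n j
      (results ++ [[("name", pvHdrName header), ("description", pvDescRev body.reverse)]])
  else results
  termination_by n - i
  decreasing_by have := pvSkip_ge lines n (i + 1); omega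

def parse_search_output_py_alt (output : String) : List (List (String × String)) :=
  let lines := (PySem.Str.split? output "\n").getD []
  let n := lines.length
  pvBLoop lines n (pvSkip lines n 0) []

-- ===== PRECONDITION & SPEC =====
def Spec_parse_search_output_py (output : String) (out : List (List (String × String))) : Prop := out = parse_search_output_py_alt output
instance (output : String) (out : List (List (String × String))) : Decidable (Spec_parse_search_output_py output out) := by unfold Spec_parse_search_output_py; infer_instance

-- ===== CLAIM (what is proved, stated in full; the proofs are below) =====
def Claim_equal_parse_search_output_py : Prop := ∀ (output : String), Dom_parse_search_output_py output → Spec_parse_search_output_py output (parse_search_output_py output)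

-- ===== LEMMAS AND PROOFS =====

-- normal form of A's current_package dict
def pvPairDict (p : String × String) : PySem.Dict String String :=
  PySem.Dict.ofList [("name", p.1), ("description", p.2)]

theorem pvPairDict_items (p : String × String) :
    (pvPairDict p).items = [("name", p.1), ("description", p.2)] := by
  simp [pvPairDict, PySem.Dict.ofList, PySem.Dict.update, PySem.Dict.insert, PySem.Dict.empty,
    PySem.Dict.contains]

theorem pvPairDict_insert (p : String × String) (s : String) :
    (pvPairDict p).insert "description" s = pvPairDict (p.1, s) := by
  simp [pvPairDict, PySem.Dict.ofList, PySem.Dict.update, PySem.Dict.insert, PySem.Dict.empty,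
    PySem.Dict.contains]

def pvEmit : Option (String × String) → List (List (String × String))
  | some p => [[("name", p.1), ("description", p.2)]]
  | none => []

-- reference recursion both ports are reduced to
def pvCanon : List String → Option (String × String) → List (List (String × String))
  | [], cur => pvEmit cur
  | l :: ls, cur =>
    if PySem.Str.startswith l "* " then
      if 2 ≤ ((PySem.Str.splitMax? l " " 2).getD []).length then
        pvEmit cur ++ pvCanon ls (some (pvHdrName l, ""))
      else pvEmit cur ++ pvCanon ls cur
    else if PySem.Str.strip l = "" then pvCanon ls cur
    else pvCanon ls (cur.map (fun p => (p.1, PySem.Str.strip l)))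

theorem pvA_canon (lines : List String) : ∀ (res : List (List (String × String)))
    (cur : Option (String × String)),
    pvAFinish (lines.foldl pvAStep (res, cur.map pvPairDict)) = res ++ pvCanon lines cur := by
  induction lines with
  | nil =>
    intro res cur
    cases cur with
    | none => simp [pvAFinish, pvCanon, pvEmit]
    | some p => simp [pvAFinish, pvCanon, pvEmit, pvPairDict_items]
  | cons l ls ih =>
    intro res cur
    simp only [List.foldl_cons, pvCanon]
    by_cases hH : PySem.Str.startswith l "* "
    · by_cases hP : 2 ≤ ((PySem.Str.splitMax? l " " 2).getD []).length
      · cases cur with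
        | none =>
          simp only [pvAStep, hH, if_true, hP, Option.map_none]
          have := ih res (some (pvHdrName l, ""))
          simp only [Option.map_some, pvPairDict] at this
          simp [pvEmit, pvHdrName] at this ⊢
          exact this
        | some p =>
          simp only [pvAStep, hH, if_true, hP, Option.map_some]
          have := ih (res ++ [[("name", p.1), ("description", p.2)]]) (some (pvHdrName l, ""))
          simp only [Option.map_some, pvPairDict] at this
          simp [pvEmit, pvHdrName, pvPairDict_items] at this ⊢
          simpa using this
      · cases cur with
        | none =>
          simp only [pvAStep, hH, if_true, hP, Option.map_none, if_false]
          have := ih res none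
          simp only [Option.map_none] at this
          simp [pvEmit] at this ⊢
          exact this
        | some p =>
          simp only [pvAStep, hH, if_true, hP, Option.map_some, if_false]
          have := ih (res ++ [[("name", p.1), ("description", p.2)]]) (some p)
          simp only [Option.map_some] at this
          simp [pvEmit, pvPairDict_items] at this ⊢
          simpa using this
    · by_cases hS : PySem.Str.strip l = ""
      · simp only [pvAStep, hH, if_false, hS, if_true, Bool.false_eq_true]
        rw [ih res cur]
      · cases cur with
        | none =>
          simp only [pvAStep, hH, hS, Option.map_none, Bool.false_eq_true, if_false]
          have := ih res none
          simp only [Option.map_none] at this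
          simpa [hS] using this
        | some p =>
          simp only [pvAStep, hH, hS, Option.map_some, Bool.false_eq_true, if_false]
          have := ih res (some (p.1, PySem.Str.strip l))
          simp only [Option.map_some] at this
          simpa [hS, pvPairDict_insert] using this

-- the fuel loop behind split(' ', 2) always returns at least acc.length + 1 pieces
theorem pvGo_len (sep : List Char) (fuel : Nat) : ∀ (m : Nat) (l cur : List Char) (acc : List (List Char)),
    acc.length + 1 ≤ (PySem.Chars.splitOnMax.go sep fuel m l cur acc).length := by
  induction fuel with
  | zero => intro m l cur acc; simp [PySem.Chars.splitOnMax.go]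
  | succ f ih =>
    intro m l cur acc
    cases l with
    | nil => simp [PySem.Chars.splitOnMax.go]
    | cons c rest =>
      rw [PySem.Chars.splitOnMax.go]
      split_ifs with h1 h2
      · simp
      · have := ih (m - 1) (List.drop sep.length (c :: rest)) [] (cur.reverse :: acc)
        simp at this ⊢; omega
      · exact ih m rest (c :: cur) acc

theorem pvGo_cons (sep : List Char) (f m : Nat) (c : Char) (rest cur : List Char)
    (acc : List (List Char)) (hm : ¬ m = 0) :
    PySem.Chars.splitOnMax.go sep (f + 1) m (c :: rest) cur acc =
      if sep.isPrefixOf (c :: rest) then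
        PySem.Chars.splitOnMax.go sep f (m - 1) (List.drop sep.length (c :: rest)) []
          (cur.reverse :: acc)
      else PySem.Chars.splitOnMax.go sep f m rest (c :: cur) acc := by
  rw [PySem.Chars.splitOnMax.go, if_neg hm]

-- a '* ' header line splits (on ' ', maxsplit 2) into at least two parts
theorem pvParts_len (l : String) (h : PySem.Str.startswith l "* " = true) :
    2 ≤ ((PySem.Str.splitMax? l " " 2).getD []).length := by
  have hpre : ['*', ' '] <+: l.toList := by
    have := (PySem.Chars.startswith_iff l.toList "* ".toList).mp (by simpa using h)
    simpa using this
  obtain ⟨rest, hrest⟩ := hpre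
  have hchars : PySem.Chars.splitMax? l.toList " ".toList 2 =
      some (PySem.Chars.splitOnMax l.toList [' '] 2) := by
    simp [PySem.Chars.splitMax?]
  rw [PySem.Str.splitMax?, hchars]
  simp only [Option.map_some, Option.getD_some, List.length_map]
  rw [PySem.Chars.splitOnMax, if_neg (by norm_num)]
  rw [← hrest]
  have hlen : (['*', ' '] ++ rest).length + 1 = (rest.length + 2) + 1 := by simp
  rw [hlen]
  have h1 := pvGo_cons [' '] (rest.length + 2) 2 '*' (' ' :: rest) [] [] (by norm_num)
  rw [show (['*', ' '] ++ rest : List Char) = ('*' :: ' ' :: rest) from rfl,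
    show Int.toNat 2 = 2 from rfl, h1, if_neg (by simp [List.isPrefixOf])]
  have h2 := pvGo_cons [' '] (rest.length + 1) 2 ' ' rest ['*'] [] (by norm_num)
  rw [show rest.length + 2 = (rest.length + 1) + 1 from rfl, h2, if_pos (by simp [List.isPrefixOf])]
  have h3 := pvGo_len [' '] (rest.length + 1) (2 - 1) (List.drop [' '].length (' ' :: rest)) []
    (['*'].reverse :: [])
  simpa using h3

def pvNotH (l : String) : Bool := !PySem.Str.startswith l "* "

theorem pvNotH_true (l : String) (h : ¬ PySem.Str.startswith l "* " = true) : pvNotH l = true := by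
  simp only [pvNotH, Bool.not_eq_true']
  exact Bool.not_eq_true _ ▸ h

theorem pvNotH_false (l : String) (h : PySem.Str.startswith l "* " = true) : pvNotH l = false := by
  simp only [pvNotH, h, Bool.not_true]

theorem pvH_of_notH_false (l : String) (h : pvNotH l = false) :
    PySem.Str.startswith l "* " = true := by
  simpa [pvNotH] using h

def pvFoldDesc (d : String) (body : List String) : String :=
  body.foldl (fun acc l => if PySem.Str.strip l = "" then acc else PySem.Str.strip l) d

theorem pvCanon_none_skip (lines : List String) :
    pvCanon lines none = pvCanon (lines.dropWhile pvNotH) none := by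
  induction lines with
  | nil => rfl
  | cons l ls ih =>
    by_cases hH : PySem.Str.startswith l "* "
    · rw [List.dropWhile_cons, if_neg (by simp [pvNotH_false l hH])]
    · rw [List.dropWhile_cons, if_pos (pvNotH_true l hH)]
      simp only [pvCanon, if_neg hH, Option.map_none]
      split_ifs with hS
      · exact ih
      · exact ih

theorem pvCanon_some (rest : List String) : ∀ (nm d : String),
    pvCanon rest (some (nm, d)) =
      [[("name", nm), ("description", pvFoldDesc d (rest.takeWhile pvNotH))]]
        ++ pvCanon (rest.dropWhile pvNotH) none := by
  induction rest with
  | nil => intro nm d; simp [pvCanon, pvEmit, pvFoldDesc]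
  | cons r rs ih =>
    intro nm d
    by_cases hH : PySem.Str.startswith r "* "
    · have hP := pvParts_len r hH
      rw [List.takeWhile_cons, if_neg (by simp [pvNotH_false r hH]),
        List.dropWhile_cons, if_neg (by simp [pvNotH_false r hH])]
      simp only [pvCanon, if_pos hH, if_pos hP, pvEmit, pvFoldDesc, List.foldl_nil]
      simp
    · have hN := pvNotH_true r hH
      rw [List.takeWhile_cons, if_pos hN, List.dropWhile_cons, if_pos hN]
      by_cases hS : PySem.Str.strip r = ""
      · simp only [pvCanon, if_neg hH, if_pos hS]
        rw [ih nm d]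
        simp [pvFoldDesc, hS]
      · simp only [pvCanon, if_neg hH, if_neg hS, Option.map_some]
        rw [ih nm (PySem.Str.strip r)]
        simp [pvFoldDesc, hS]

theorem pvDescRev_append (a b : List String) :
    pvDescRev (a ++ b) = if pvDescRev a = "" then pvDescRev b else pvDescRev a := by
  induction a with
  | nil => simp [pvDescRev]
  | cons x xs ih =>
    simp only [List.cons_append, pvDescRev]
    by_cases h : PySem.Str.strip x = "" <;> simp [h, ih]

theorem pvFoldDesc_eq (body : List String) : ∀ (d : String),
    pvFoldDesc d body = if pvDescRev body.reverse = "" then d else pvDescRev body.reverse := by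
  induction body with
  | nil => intro d; simp [pvFoldDesc, pvDescRev]
  | cons x xs ih =>
    intro d
    simp only [pvFoldDesc, List.foldl_cons, List.reverse_cons]
    rw [show (List.foldl _ _ xs =
      pvFoldDesc (if PySem.Str.strip x = "" then d else PySem.Str.strip x) xs) from rfl]
    rw [ih, pvDescRev_append]
    by_cases h1 : pvDescRev xs.reverse = "" <;> by_cases h2 : PySem.Str.strip x = "" <;>
      simp [h1, h2, pvDescRev]

theorem pvFoldDesc_empty (body : List String) : pvFoldDesc "" body = pvDescRev body.reverse := by
  rw [pvFoldDesc_eq]; split_ifs with h; exact h.symm; rfl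

theorem pvTakeLen (p : String → Bool) (s : List String) :
    s.take (s.takeWhile p).length = s.takeWhile p := by
  induction s with
  | nil => rfl
  | cons x xs ih =>
    rw [List.takeWhile_cons]
    split_ifs with h
    · simp [List.take_succ_cons, ih]
    · simp

theorem pvDropLen (p : String → Bool) (s : List String) :
    s.drop (s.takeWhile p).length = s.dropWhile p := by
  induction s with
  | nil => rfl
  | cons x xs ih =>
    rw [List.takeWhile_cons, List.dropWhile_cons]
    split_ifs with h
    · simp [ih]
    · simp

theorem pvSkip_eq (lines : List String) : ∀ (i : Nat), i ≤ lines.length →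
    pvSkip lines lines.length i = i + ((lines.drop i).takeWhile pvNotH).length := by
  have H : ∀ (k i : Nat), lines.length - i ≤ k → i ≤ lines.length →
      pvSkip lines lines.length i = i + ((lines.drop i).takeWhile pvNotH).length := by
    intro k
    induction k with
    | zero =>
      intro i hk hi
      have hi' : i = lines.length := by omega
      rw [pvSkip, dif_neg (by omega), hi']
      simp
    | succ k ih =>
      intro i hk hi
      by_cases hlt : i < lines.length
      · have hdrop := List.drop_eq_getElem_cons hlt
        by_cases hH : PySem.Str.startswith lines[i] "* " = true
        · rw [pvSkip, dif_neg (by rw [List.getD_eq_getElem lines "" hlt]; tauto)]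
          rw [hdrop, List.takeWhile_cons, if_neg (by simp [pvNotH_false _ hH])]
          simp
        · rw [pvSkip, dif_pos ⟨hlt, by rw [List.getD_eq_getElem lines "" hlt]; exact hH⟩]
          rw [ih (i + 1) (by omega) (by omega)]
          rw [hdrop, List.takeWhile_cons, if_pos (pvNotH_true _ hH)]
          simp; omega
      · have hi' : i = lines.length := by omega
        rw [pvSkip, dif_neg (by omega), hi']
        simp
  exact fun i => H lines.length i (by omega)

-- what pvSkip guarantees about its result: a bound, the drop picture, and "at a header or at the end"
theorem pvSkip_inv (lines : List String) (i : Nat) (hi : i ≤ lines.length) :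
    pvSkip lines lines.length i ≤ lines.length ∧
    lines.drop (pvSkip lines lines.length i) = (lines.drop i).dropWhile pvNotH ∧
    (pvSkip lines lines.length i = lines.length ∨
      PySem.Str.startswith (lines.getD (pvSkip lines lines.length i) "") "* " = true) := by
  have heq := pvSkip_eq lines i hi
  have hlen : ((lines.drop i).takeWhile pvNotH).length ≤ lines.length - i := by
    have h1 := (List.takeWhile_sublist (p := pvNotH) (l := lines.drop i)).length_le
    simpa using h1
  have hle : pvSkip lines lines.length i ≤ lines.length := by omega
  have hdropdrop : lines.drop (pvSkip lines lines.length i) = (lines.drop i).dropWhile pvNotH := by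
    rw [heq, ← pvDropLen pvNotH (lines.drop i), List.drop_drop]
  refine ⟨hle, hdropdrop, ?_⟩
  by_cases hend : pvSkip lines lines.length i = lines.length
  · exact Or.inl hend
  · right
    have hlt : pvSkip lines lines.length i < lines.length := by omega
    have hne : lines.drop (pvSkip lines lines.length i) ≠ [] := by
      simp [List.drop_eq_nil_iff]; omega
    have hne' : (lines.drop i).dropWhile pvNotH ≠ [] := hdropdrop ▸ hne
    have hhead : pvNotH (((lines.drop i).dropWhile pvNotH).head hne') = false :=
      List.head_dropWhile_not pvNotH hne'
    have hheadeq : ((lines.drop i).dropWhile pvNotH).head hne'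
        = lines[pvSkip lines lines.length i] := by
      rw [List.head_eq_getElem]
      simp only [← hdropdrop]
      simp
    rw [List.getD_eq_getElem lines "" hlt]
    exact pvH_of_notH_false _ (hheadeq ▸ hhead)

theorem pvBLoop_canon (lines : List String) : ∀ (i : Nat) (res : List (List (String × String))),
    i ≤ lines.length →
    (i = lines.length ∨ PySem.Str.startswith (lines.getD i "") "* " = true) →
    pvBLoop lines lines.length i res = res ++ pvCanon (lines.drop i) none := by
  have H : ∀ (k i : Nat) (res : List (List (String × String))), lines.length - i ≤ k →
      i ≤ lines.length →
      (i = lines.length ∨ PySem.Str.startswith (lines.getD i "") "* " = true) →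
      pvBLoop lines lines.length i res = res ++ pvCanon (lines.drop i) none := by
    intro k
    induction k with
    | zero =>
      intro i res hk hi _
      have hi' : i = lines.length := by omega
      rw [pvBLoop, dif_neg (by omega), hi']
      simp [pvCanon, pvEmit]
    | succ k ih =>
      intro i res hk hi hd
      by_cases hlt : i < lines.length
      · have hH : PySem.Str.startswith lines[i] "* " = true := by
          rcases hd with hd | hd
          · omega
          · rwa [List.getD_eq_getElem lines "" hlt] at hd
        have hP := pvParts_len _ hH
        obtain ⟨hjle, hjdrop, hjinv⟩ := pvSkip_inv lines (i + 1) (by omega)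
        have hjeq := pvSkip_eq lines (i + 1) (by omega)
        have hjge := pvSkip_ge lines lines.length (i + 1)
        rw [pvBLoop, dif_pos hlt]
        rw [ih (pvSkip lines lines.length (i + 1)) _ (by omega) hjle hjinv]
        have hbody : (lines.drop (i + 1)).take (pvSkip lines lines.length (i + 1) - (i + 1))
            = (lines.drop (i + 1)).takeWhile pvNotH := by
          rw [hjeq, Nat.add_sub_cancel_left, pvTakeLen]
        rw [List.drop_eq_getElem_cons hlt, List.getD_eq_getElem lines "" hlt]
        simp only [pvCanon, if_pos hH, if_pos hP, pvEmit, List.nil_append]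
        rw [pvCanon_some, hbody, pvFoldDesc_empty, hjdrop]
        simp
      · have hi' : i = lines.length := by omega
        rw [pvBLoop, dif_neg (by omega), hi']
        simp [pvCanon, pvEmit]
  exact fun i res => H lines.length i res (by omega)

-- ===== VERDICT (by name: the statement is the Claim_ definition above) =====
theorem parse_search_output_py_spec : Claim_equal_parse_search_output_py := by
  intro output _
  unfold Spec_parse_search_output_py parse_search_output_py parse_search_output_py_alt
  set L := (PySem.Str.split? output "\n").getD [] with hL
  have hA : pvAFinish (L.foldl pvAStep ([], none)) = pvCanon L none := by
    have := pvA_canon L [] none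
    simpa using this
  obtain ⟨hle, hdrop, hinv⟩ := pvSkip_inv L 0 (by omega)
  rw [hA, pvBLoop_canon L (pvSkip L L.length 0) [] hle hinv]
  rw [hdrop]
  simp only [List.drop_zero, List.nil_append]
  exact pvCanon_none_skip L
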